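-- pv_equiv track=rewrite | github.com/maiconc137/desafioPython | iniciante/ex014.py | num_par
-- ===== SOURCE A (Python) =====
-- def num_par(x):
--     par = []
--     for i in range(x):
--         if i % 2 == 0:
--             par.append(i)
--         else:
--             continue
--     return par
-- ===== SOURCE B (Python) =====
-- def num_par(x):
--     k = (x + 1) // 2
--     return [2 * i for i in range(k)]
-- ===== Notes on version B (the rewrite author's own statement) =====
-- stated objective: simpler
-- what changed: B computes the count of evens below x in closed form, k = (x+1)//2, and generates them directly as 2*i for i in range(k), instead of filtering range(x) with a modulo test.
import Mathlib
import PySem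

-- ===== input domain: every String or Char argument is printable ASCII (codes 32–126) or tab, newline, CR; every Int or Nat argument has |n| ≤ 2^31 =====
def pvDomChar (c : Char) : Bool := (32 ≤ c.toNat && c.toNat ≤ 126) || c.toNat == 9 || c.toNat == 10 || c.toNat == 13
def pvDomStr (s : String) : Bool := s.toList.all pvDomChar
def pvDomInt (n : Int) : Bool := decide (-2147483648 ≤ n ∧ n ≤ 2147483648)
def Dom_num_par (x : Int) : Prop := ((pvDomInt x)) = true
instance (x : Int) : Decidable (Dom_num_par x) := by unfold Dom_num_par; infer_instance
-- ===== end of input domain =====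

-- B replaces A's filter of range(x) by a modulo test with direct generation:
-- k = (x+1)//2 evens exist below x, and the i-th is 2*i.

-- ===== PORT A =====
def num_par (x : Int) : List Int :=
  (PySem.List.pyRange 0 x 1).foldl
    (fun par i => if PySem.Int.mod i 2 == 0 then par ++ [i] else par) []

-- ===== PORT B =====
def num_par_alt (x : Int) : List Int :=
  (PySem.List.pyRange 0 (PySem.Int.floordiv (x + 1) 2) 1).map (fun i => 2 * i)

-- ===== PRECONDITION & SPEC =====
def Spec_num_par (x : Int) (out : List Int) : Prop := out = num_par_alt x
instance (x : Int) (out : List Int) : Decidable (Spec_num_par x out) := by unfold Spec_num_par; infer_instance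

-- ===== CLAIM (what is proved, stated in full; the proofs are below) =====
def Claim_equal_num_par : Prop := ∀ (x : Int), Dom_num_par x → Spec_num_par x (num_par x)

-- ===== LEMMAS AND PROOFS =====

-- the shared loop invariant, stated over natural n
lemma num_par_key (n : Nat) :
    (List.range n).foldl
      (fun (par : List Int) (i : Nat) =>
        if PySem.Int.mod (0 + (i : Int)) 2 == 0 then par ++ [0 + (i : Int)] else par) [] =
    (List.range ((n + 1) / 2)).map (fun (i : Nat) => 2 * (0 + (i : Int))) := by
  induction n with
  | zero => simp
  | succ n ih =>
    rw [List.range_succ, List.foldl_append]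
    rcases Nat.even_or_odd n with h | h
    · obtain ⟨m, hm⟩ := h
      have h2 : PySem.Int.mod (0 + (n : Int)) 2 == 0 := by
        simp [PySem.Int.mod, Int.fmod_eq_emod]; omega
      have hk : (n + 1 + 1) / 2 = (n + 1) / 2 + 1 := by omega
      have hk2 : (n + 1) / 2 = m := by omega
      simp only [List.foldl, ih, h2, hk, List.range_succ, List.map_append, if_true]
      rw [hk2]
      simp
      omega
    · obtain ⟨m, hm⟩ := h
      have h2 : ¬ (PySem.Int.mod (0 + (n : Int)) 2 == 0) := by
        simp [PySem.Int.mod, Int.fmod_eq_emod]; omega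
      have hk : (n + 1 + 1) / 2 = (n + 1) / 2 := by omega
      simp only [List.foldl, ih, hk]
      rw [if_neg h2]

lemma toNat_floordiv (x : Int) : ((PySem.Int.floordiv (x + 1) 2).toNat) = (x.toNat + 1) / 2 := by
  simp [PySem.Int.floordiv, Int.fdiv_eq_ediv]; omega

-- ===== VERDICT (by name: the statement is the Claim_ definition above) =====
theorem num_par_spec : Claim_equal_num_par := by
  intro x _
  show num_par x = num_par_alt x
  unfold num_par num_par_alt
  rw [PySem.List.pyRange_one, PySem.List.pyRange_one, List.foldl_map, List.map_map]
  simp only [sub_zero, toNat_floordiv]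
  exact num_par_key x.toNat
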